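-- pv_equiv track=rewrite | github.com/GrtSid/tapsearch | main.py | tapsearch
-- ===== SOURCE A (Python) =====
-- from collections import defaultdict
--
-- def tapsearch(st,word):
--     d=defaultdict(list)
--     d.clear()
--     l1=st
--     l=0
--     for i in l1:
--         l=l+1
--         i=i.split(" ")
--         for k in i:
--             if (len(d[k])>0):
--                 if((d[k][-1]==l)):
--                     continue
--             d[k.lower()].append(l)
--     word=word.lstrip(" ")
--     return(d[word])
-- ===== SOURCE B (Python) =====
-- def tapsearch(st, word):
--     word = word.lstrip(" ")
--     return [l for l, line in enumerate(st, 1)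
--             if any(tok.lower() == word for tok in line.split(" "))]
-- ===== Notes on version B (the rewrite author's own statement) =====
-- stated objective: simpler
-- what changed: Replaces the defaultdict that accumulates a line list for every token with a one-line comprehension that keeps each line number at most once when any token case-insensitively equals the (lstripped) word.
-- intended difference: On inputs where some line contains the word more than once with at least one case-mixed occurrence that is not shielded as in A, A returns that line number several times because its duplicate check reads the original-case dict entry while it appends under the lowercased key; B returns each matching line number exactly once, which is the intended 'lines containing the word' result. — e.g. on tapsearch(["ab Ab"], "ab"): A returns [1, 1], B returns [1]
import Mathlib
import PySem

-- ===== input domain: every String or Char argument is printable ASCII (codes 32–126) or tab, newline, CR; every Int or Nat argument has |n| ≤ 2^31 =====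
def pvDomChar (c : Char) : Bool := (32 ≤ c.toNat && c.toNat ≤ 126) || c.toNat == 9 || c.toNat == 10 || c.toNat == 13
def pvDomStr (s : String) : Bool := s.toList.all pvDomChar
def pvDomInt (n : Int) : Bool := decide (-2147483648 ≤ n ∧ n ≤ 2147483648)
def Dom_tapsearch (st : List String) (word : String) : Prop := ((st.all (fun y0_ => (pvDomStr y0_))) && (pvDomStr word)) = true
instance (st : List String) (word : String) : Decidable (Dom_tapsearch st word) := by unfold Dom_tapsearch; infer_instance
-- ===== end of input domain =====

-- B returns each matching line number once, instead of A's dict of per-token line lists; return value only, no mutation.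

-- ===== PORT A =====
-- i.split(" "): sep is nonempty, so split? is always some; getD [] is exact.
-- word.lstrip(" "): ported by hand as dropWhile (· = ' ') on the characters — exact (strips only spaces from the left).
def pvLstripSpaces (s : String) : String := String.ofList (s.toList.dropWhile (· = ' '))

-- body of A's inner loop: the nested 'if len(d[k])>0: if d[k][-1]==l: continue' then 'd[k.lower()].append(l)'
def tapAStep (l : Int) (d : PySem.Dict String (List Int)) (k : String) : PySem.Dict String (List Int) :=
  let cur := d.getD k []
  if cur.length > 0 ∧ PySem.List.pyGetD cur (-1) 0 = l then d
  else d.insert (PySem.Str.lower k) (d.getD (PySem.Str.lower k) [] ++ [l])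

-- body of A's outer loop: l = l + 1; i = i.split(" "); for k in i: …
def tapALine (acc : PySem.Dict String (List Int) × Int) (i : String) : PySem.Dict String (List Int) × Int :=
  let l := acc.2 + 1
  (((PySem.Str.split? i " ").getD []).foldl (tapAStep l) acc.1, l)

def tapsearch (st : List String) (word : String) : List Int :=
  let fin := st.foldl tapALine (PySem.Dict.empty, 0)
  fin.1.getD (pvLstripSpaces word) []

-- ===== PORT B =====
-- the comprehension: [l for l, line in enumerate(st, 1) if any(tok.lower() == word for tok in line.split(" "))]
def tapsearch_alt (st : List String) (word : String) : List Int :=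
  let w := pvLstripSpaces word
  ((PySem.List.enumerate st 1).filter
      (fun p => ((PySem.Str.split? p.2 " ").getD []).any (fun t => PySem.Str.lower t == w))).map (fun p => p.1)

-- ===== PRECONDITION & SPEC =====
-- On inputs where some line contains the word more than once with an unshielded case-mixed occurrence, A returns
-- that line number several times (its duplicate check reads the original-case dict entry while it appends under the
-- lowercased key); B returns each matching line number exactly once, the intended 'lines containing the word' result.
def pvBadLine (w : String) (line : String) : Bool :=
  let toks := (PySem.Str.split? line " ").getD []
  let mixed := toks.filter (fun t => PySem.Str.lower t == w && t != w)
  2 ≤ mixed.length || (1 ≤ mixed.length && toks.find? (fun t => PySem.Str.lower t == w) == some w)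

def D_tapsearch (st : List String) (word : String) : Prop :=
  (st.any (pvBadLine (pvLstripSpaces word))) = true
instance (st : List String) (word : String) : Decidable (D_tapsearch st word) := by unfold D_tapsearch; infer_instance

def Spec_tapsearch (st : List String) (word : String) (out : List Int) : Prop := ¬ D_tapsearch st word → out = tapsearch_alt st word
instance (st : List String) (word : String) (out : List Int) : Decidable (Spec_tapsearch st word out) := by unfold Spec_tapsearch; infer_instance

def pvDiffWitness_tapsearch : List String × String := (["ab Ab"], "ab")
def pvDiffWitnessOut_tapsearch : (List Int) × (List Int) := ([1, 1], [1])

-- ===== CLAIM (what is proved, stated in full; the proofs are below) =====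
def Claim_unchanged_tapsearch : Prop := ∀ (st : List String) (word : String), Dom_tapsearch st word → Spec_tapsearch st word (tapsearch st word)
def Claim_exact_tapsearch : Prop := ∀ (st : List String) (word : String), Dom_tapsearch st word → D_tapsearch st word → tapsearch st word ≠ tapsearch_alt st word
def Claim_changed_tapsearch : Prop := Dom_tapsearch (pvDiffWitness_tapsearch.1) (pvDiffWitness_tapsearch.2) ∧ D_tapsearch (pvDiffWitness_tapsearch.1) (pvDiffWitness_tapsearch.2) ∧ tapsearch (pvDiffWitness_tapsearch.1) (pvDiffWitness_tapsearch.2) = pvDiffWitnessOut_tapsearch.1 ∧ tapsearch_alt (pvDiffWitness_tapsearch.1) (pvDiffWitness_tapsearch.2) = pvDiffWitnessOut_tapsearch.2 ∧ pvDiffWitnessOut_tapsearch.1 ≠ pvDiffWitnessOut_tapsearch.2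

-- ===== LEMMAS AND PROOFS =====

-- ASCII lower is idempotent
lemma lowerChar_idem (c : Char) : PySem.Chars.lowerChar (PySem.Chars.lowerChar c) = PySem.Chars.lowerChar c := by
  unfold PySem.Chars.lowerChar PySem.Chars.isupper
  by_cases h1 : 'A' ≤ c <;> by_cases h2 : c ≤ 'Z' <;> simp [h1, h2]
  have hA : 65 ≤ c.toNat := h1
  have hZ : c.toNat ≤ 90 := h2
  have hx : (Char.ofNat (c.toNat + 32)).toNat = c.toNat + 32 := by
    rw [Char.toNat_ofNat, if_pos]; left; omega
  intro hle hle2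
  have h3 : (Char.ofNat (c.toNat + 32)).toNat ≤ 90 := hle2
  omega

lemma lower_idem (s : String) : PySem.Str.lower (PySem.Str.lower s) = PySem.Str.lower s := by
  unfold PySem.Str.lower PySem.Chars.lower
  congr 1
  simp [List.map_map, Function.comp, lowerChar_idem]

-- the dict invariant A maintains: every key with a nonempty list is already lowercase
def tapInv (d : PySem.Dict String (List Int)) : Prop :=
  ∀ q, d.getD q [] ≠ [] → PySem.Str.lower q = q

-- the "mimic" step: what A's inner loop does to the single list d[w] (proof-side abstraction of A only)
def tapMStep (w : String) (l : Int) (res : List Int) (tok : String) : List Int :=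
  if PySem.Str.lower tok = w then
    if tok = w ∧ res ≠ [] ∧ PySem.List.pyGetD res (-1) 0 = l then res
    else res ++ [l]
  else res

def tapMLine (w : String) (res : List Int) (p : Int × String) : List Int :=
  ((PySem.Str.split? p.2 " ").getD []).foldl (tapMStep w p.1) res

def tapMimic (st : List String) (word : String) : List Int :=
  let w := pvLstripSpaces word
  (PySem.List.enumerate st 1).foldl (tapMLine w) []

lemma step_lemma (w : String) (l : Int) (d : PySem.Dict String (List Int)) (k : String)
    (h1 : tapInv d) :
    (tapAStep l d k).getD w [] = tapMStep w l (d.getD w []) k ∧ tapInv (tapAStep l d k) := by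
  unfold tapAStep tapMStep
  by_cases hc : (d.getD k []).length > 0 ∧ PySem.List.pyGetD (d.getD k []) (-1) 0 = l
  · have hne : d.getD k [] ≠ [] := by
      intro h; rw [h] at hc; simp at hc
    have hk : PySem.Str.lower k = k := h1 k hne
    rw [if_pos hc]
    refine ⟨?_, h1⟩
    by_cases hw : PySem.Str.lower k = w
    · have hkw : k = w := by rw [← hk, hw]
      rw [if_pos hw, if_pos]
      subst hkw
      exact ⟨rfl, hne, hc.2⟩
    · rw [if_neg hw]
  · rw [if_neg hc]
    constructor
    · rw [PySem.Dict.getD_insert]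
      by_cases hw : PySem.Str.lower k = w
      · rw [if_pos hw.symm, if_pos hw, if_neg, hw]
        intro ⟨hkw, hres, hlast⟩
        subst hkw
        exact hc ⟨List.length_pos_iff.mpr hres, hlast⟩
      · rw [if_neg (fun h => hw h.symm), if_neg hw]
    · intro q hq
      rw [PySem.Dict.getD_insert] at hq
      by_cases hqk : q = PySem.Str.lower k
      · rw [hqk]; exact lower_idem k
      · rw [if_neg hqk] at hq; exact h1 q hq

lemma toks_lemma (w : String) (l : Int) (toks : List String) :
    ∀ (d : PySem.Dict String (List Int)), tapInv d →
    (toks.foldl (tapAStep l) d).getD w [] = toks.foldl (tapMStep w l) (d.getD w []) ∧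
      tapInv (toks.foldl (tapAStep l) d) := by
  induction toks with
  | nil => intro d h; exact ⟨rfl, h⟩
  | cons t ts ih =>
    intro d h
    obtain ⟨e1, e2⟩ := step_lemma w l d t h
    obtain ⟨f1, f2⟩ := ih (tapAStep l d t) e2
    refine ⟨?_, by simpa using f2⟩
    simpa [e1] using f1

lemma main_lemma (w : String) (st : List String) :
    ∀ (d : PySem.Dict String (List Int)) (l0 : Int), tapInv d →
    (st.foldl tapALine (d, l0)).1.getD w [] =
      (PySem.List.enumerate st (l0 + 1)).foldl (tapMLine w) (d.getD w []) := by
  induction st with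
  | nil => intro d l0 h; rfl
  | cons i rest ih =>
    intro d l0 h
    have henum : PySem.List.enumerate (i :: rest) (l0 + 1) =
        (l0 + 1, i) :: PySem.List.enumerate rest (l0 + 1 + 1) := by
      simp [PySem.List.enumerate]
    obtain ⟨e1, e2⟩ := toks_lemma w (l0 + 1) ((PySem.Str.split? i " ").getD []) d h
    rw [henum]
    simp only [List.foldl_cons]
    have hA : tapALine (d, l0) i =
        (((PySem.Str.split? i " ").getD []).foldl (tapAStep (l0 + 1)) d, l0 + 1) := rfl
    rw [hA, ih _ (l0 + 1) e2]
    have hB : tapMLine w (d.getD w []) (l0 + 1, i) =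
        ((PySem.Str.split? i " ").getD []).foldl (tapMStep w (l0 + 1)) (d.getD w []) := rfl
    rw [hB, ← e1]

lemma A_eq_mimic (st : List String) (word : String) : tapsearch st word = tapMimic st word := by
  unfold tapsearch tapMimic
  have h0 : tapInv PySem.Dict.empty := by
    intro q hq; exact absurd (PySem.Dict.getD_empty q []) hq
  simpa using main_lemma (pvLstripSpaces word) st PySem.Dict.empty 0 h0

-- badness of a token list (pvBadLine on the split result)
def tapBadToks (w : String) (toks : List String) : Bool :=
  let mixed := toks.filter (fun t => PySem.Str.lower t == w && t != w)
  2 ≤ mixed.length || (1 ≤ mixed.length && toks.find? (fun t => PySem.Str.lower t == w) == some w)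

-- after an append this line, only exact-case matches remain: the mimic fold is the identity
lemma post_lemma (w : String) (l : Int) (toks : List String)
    (hex : ∀ t ∈ toks, PySem.Str.lower t = w → t = w) :
    ∀ res, res ≠ [] → PySem.List.pyGetD res (-1) 0 = l →
    toks.foldl (tapMStep w l) res = res := by
  induction toks with
  | nil => intro res _ _; rfl
  | cons t ts ih =>
    intro res hne hlast
    have hts : ∀ t' ∈ ts, PySem.Str.lower t' = w → t' = w := fun t' ht' => hex t' (by simp [ht'])
    simp only [List.foldl_cons]
    by_cases hm : PySem.Str.lower t = w
    · have ht : t = w := hex t (by simp) hm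
      have : tapMStep w l res t = res := by
        unfold tapMStep
        rw [if_pos hm, if_pos ⟨ht, hne, hlast⟩]
      rw [this]; exact ih hts res hne hlast
    · have : tapMStep w l res t = res := by unfold tapMStep; rw [if_neg hm]
      rw [this]; exact ih hts res hne hlast

lemma pre_lemma (w : String) (l : Int) (toks : List String) :
    ∀ res, tapBadToks w toks = false → (res = [] ∨ PySem.List.pyGetD res (-1) 0 ≠ l) →
    toks.foldl (tapMStep w l) res =
      res ++ (if toks.any (fun t => PySem.Str.lower t == w) then [l] else []) := by
  induction toks with
  | nil => intro res _ _; simp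
  | cons t ts ih =>
    intro res hbad hres
    simp only [List.foldl_cons]
    by_cases hm : PySem.Str.lower t = w
    · -- t matches: it appends (res empty or last ≠ l)
      have hcond : ¬ (t = w ∧ res ≠ [] ∧ PySem.List.pyGetD res (-1) 0 = l) := by
        rintro ⟨_, hne, hlast⟩
        rcases hres with h | h
        · exact hne h
        · exact h hlast
      have hstep : tapMStep w l res t = res ++ [l] := by
        unfold tapMStep; rw [if_pos hm, if_neg hcond]
      rw [hstep]
      -- from ¬bad: every match in ts is exact
      have hexts : ∀ t' ∈ ts, PySem.Str.lower t' = w → t' = w := by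
        intro t' ht' hm'
        by_contra hne'
        have ht'mixed : t' ∈ ts.filter (fun x => PySem.Str.lower x == w && x != w) := by
          simp [List.mem_filter, ht', hm', hne']
        have hlen : 0 < (ts.filter (fun x => PySem.Str.lower x == w && x != w)).length :=
          List.length_pos_iff.mpr (List.ne_nil_of_mem ht'mixed)
        unfold tapBadToks at hbad
        by_cases hexact : t = w
        · have hfe : (t :: ts).filter (fun x => PySem.Str.lower x == w && x != w) =
              ts.filter (fun x => PySem.Str.lower x == w && x != w) := by
            simp [hexact]
          have hfind : (t :: ts).find? (fun x => PySem.Str.lower x == w) = some t := by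
            simp [hm]
          simp only [hfe, hfind, Bool.or_eq_false_iff, Bool.and_eq_false_iff,
            decide_eq_false_iff_not, not_le] at hbad
          rcases hbad.2 with h | h
          · omega
          · simp [hexact] at h
        · have hfe : (t :: ts).filter (fun x => PySem.Str.lower x == w && x != w) =
              t :: ts.filter (fun x => PySem.Str.lower x == w && x != w) := by
            simp [hm, hexact]
          simp only [hfe, List.length_cons, Bool.or_eq_false_iff, Bool.and_eq_false_iff,
            decide_eq_false_iff_not, not_le] at hbad
          have := hbad.1
          omega
      rw [post_lemma w l ts hexts (res ++ [l]) (by simp)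
            (PySem.List.pyGetD_neg_one_append_singleton res l 0)]
      simp [hm]
    · -- t does not match: skip; badness of ts equals badness of t::ts
      have hstep : tapMStep w l res t = res := by unfold tapMStep; rw [if_neg hm]
      have hbadts : tapBadToks w ts = false := by
        unfold tapBadToks at hbad ⊢
        have hfe : (t :: ts).filter (fun x => PySem.Str.lower x == w && x != w) =
            ts.filter (fun x => PySem.Str.lower x == w && x != w) := by
          simp [hm]
        have hfind : (t :: ts).find? (fun x => PySem.Str.lower x == w) =
            ts.find? (fun x => PySem.Str.lower x == w) := by
          simp [hm]
        rw [hfe, hfind] at hbad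
        exact hbad
      rw [hstep, ih res hbadts hres]
      simp [hm]

-- if res is nonempty, res[-1] is a member
lemma pyGetD_neg_one_mem (res : List Int) (h : res ≠ []) :
    PySem.List.pyGetD res (-1) 0 ∈ res := by
  rw [PySem.List.pyGetD_neg_one res 0 h]
  exact List.getLast_mem h

lemma outer_lemma (w : String) (st : List String) :
    ∀ (res : List Int) (l0 : Int),
    (∀ line ∈ st, pvBadLine w line = false) → (∀ x ∈ res, x ≤ l0) →
    (PySem.List.enumerate st (l0 + 1)).foldl (tapMLine w) res =
      res ++ ((PySem.List.enumerate st (l0 + 1)).filter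
        (fun p => ((PySem.Str.split? p.2 " ").getD []).any (fun t => PySem.Str.lower t == w))).map (fun p => p.1) := by
  induction st with
  | nil => intro res l0 _ _; simp [PySem.List.enumerate]
  | cons i rest ih =>
    intro res l0 hbad hle
    have henum : PySem.List.enumerate (i :: rest) (l0 + 1) =
        (l0 + 1, i) :: PySem.List.enumerate rest (l0 + 1 + 1) := by
      simp [PySem.List.enumerate]
    rw [henum]
    simp only [List.foldl_cons, List.filter_cons]
    have hline : tapMLine w res (l0 + 1, i) =
        res ++ (if ((PySem.Str.split? i " ").getD []).any (fun t => PySem.Str.lower t == w) then [l0 + 1] else []) := by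
      unfold tapMLine
      apply pre_lemma w (l0 + 1) _ res
      · exact hbad i (by simp)
      · by_cases hres : res = []
        · exact Or.inl hres
        · refine Or.inr (fun hlast => ?_)
          have := hle _ (hlast ▸ pyGetD_neg_one_mem res hres)
          omega
    rw [hline]
    have hrest := ih (res ++ (if ((PySem.Str.split? i " ").getD []).any (fun t => PySem.Str.lower t == w) then [l0 + 1] else []))
        (l0 + 1)
        (fun line hl => hbad line (by simp [hl]))
        (by
          intro x hx
          rcases List.mem_append.mp hx with h | h
          · exact (hle x h).trans (by omega)
          · split at h <;> simp_all)
    rw [hrest]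
    by_cases hany : ((PySem.Str.split? i " ").getD []).any (fun t => PySem.Str.lower t == w) = true
    · simp [hany, List.append_assoc]
    · simp only [Bool.not_eq_true] at hany
      simp [hany]

-- ===== tightness: inside D_, A and B always differ (by length) =====

-- how many copies of l the mimic appends for one line's tokens
def tapMixedCnt (w : String) (toks : List String) : Nat :=
  (toks.filter (fun t => PySem.Str.lower t == w && t != w)).length
def tapCnt (w : String) (toks : List String) : Nat :=
  tapMixedCnt w toks + (if toks.find? (fun t => PySem.Str.lower t == w) == some w then 1 else 0)

-- once an append happened this line (last = l), only mixed-case matches append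
lemma postX (w : String) (l : Int) (toks : List String) :
    ∀ res, res ≠ [] → PySem.List.pyGetD res (-1) 0 = l →
    toks.foldl (tapMStep w l) res = res ++ List.replicate (tapMixedCnt w toks) l := by
  induction toks with
  | nil => intro res _ _; simp [tapMixedCnt]
  | cons t ts ih =>
    intro res hne hlast
    simp only [List.foldl_cons]
    by_cases hm : PySem.Str.lower t = w
    · by_cases hex : t = w
      · have hstep : tapMStep w l res t = res := by
          unfold tapMStep; rw [if_pos hm, if_pos ⟨hex, hne, hlast⟩]
        rw [hstep, ih res hne hlast]
        unfold tapMixedCnt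
        simp [hex]
      · have hstep : tapMStep w l res t = res ++ [l] := by
          unfold tapMStep; rw [if_pos hm, if_neg (by rintro ⟨h, _, _⟩; exact hex h)]
        rw [hstep, ih (res ++ [l]) (by simp) (PySem.List.pyGetD_neg_one_append_singleton res l 0)]
        unfold tapMixedCnt
        simp [hm, hex, List.replicate_succ]
    · have hstep : tapMStep w l res t = res := by unfold tapMStep; rw [if_neg hm]
      rw [hstep, ih res hne hlast]
      unfold tapMixedCnt
      simp [hm]

-- before any append this line, the mimic appends exactly tapCnt copies of l
lemma preX (w : String) (l : Int) (toks : List String) :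
    ∀ res, (res = [] ∨ PySem.List.pyGetD res (-1) 0 ≠ l) →
    toks.foldl (tapMStep w l) res = res ++ List.replicate (tapCnt w toks) l := by
  induction toks with
  | nil => intro res _; simp [tapCnt, tapMixedCnt]
  | cons t ts ih =>
    intro res hres
    simp only [List.foldl_cons]
    by_cases hm : PySem.Str.lower t = w
    · have hcond : ¬ (t = w ∧ res ≠ [] ∧ PySem.List.pyGetD res (-1) 0 = l) := by
        rintro ⟨_, hne, hlast⟩
        rcases hres with h | h
        · exact hne h
        · exact h hlast
      have hstep : tapMStep w l res t = res ++ [l] := by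
        unfold tapMStep; rw [if_pos hm, if_neg hcond]
      have hfind : (t :: ts).find? (fun x => PySem.Str.lower x == w) = some t := by simp [hm]
      rw [hstep, postX w l ts (res ++ [l]) (by simp) (PySem.List.pyGetD_neg_one_append_singleton res l 0)]
      unfold tapCnt tapMixedCnt
      rw [hfind]
      by_cases hex : t = w
      · have hc : 1 + (ts.filter (fun x => PySem.Str.lower x == w && x != w)).length =
            (ts.filter (fun x => PySem.Str.lower x == w && x != w)).length + 1 := Nat.add_comm _ _
        simp [hex, hc, List.replicate_succ]
      · simp [hex, hm, List.replicate_succ]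
    · have hstep : tapMStep w l res t = res := by unfold tapMStep; rw [if_neg hm]
      have hfe : (t :: ts).filter (fun x => PySem.Str.lower x == w && x != w) =
          ts.filter (fun x => PySem.Str.lower x == w && x != w) := by simp [hm]
      have hfind : (t :: ts).find? (fun x => PySem.Str.lower x == w) =
          ts.find? (fun x => PySem.Str.lower x == w) := by simp [hm]
      rw [hstep, ih res hres]
      unfold tapCnt tapMixedCnt
      rw [hfe, hfind]

lemma alt_len (w : String) (st : List String) :
    ∀ s : Int, (((PySem.List.enumerate st s).filter
        (fun p => ((PySem.Str.split? p.2 " ").getD []).any (fun t => PySem.Str.lower t == w))).map (fun p => p.1)).length =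
      (st.map (fun line => if ((PySem.Str.split? line " ").getD []).any (fun t => PySem.Str.lower t == w) then 1 else 0)).sum := by
  induction st with
  | nil => intro s; simp [PySem.List.enumerate]
  | cons i rest ih =>
    intro s
    have henum : PySem.List.enumerate (i :: rest) s = (s, i) :: PySem.List.enumerate rest (s + 1) := by
      simp [PySem.List.enumerate]
    rw [henum]
    simp only [List.filter_cons, List.map_cons, List.sum_cons]
    by_cases h : ((PySem.Str.split? i " ").getD []).any (fun t => PySem.Str.lower t == w) = true
    · simp [h, ih (s + 1), Nat.add_comm]
    · simp only [Bool.not_eq_true] at h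
      simp [h, ih (s + 1)]

lemma mimic_len (w : String) (st : List String) :
    ∀ (res : List Int) (l0 : Int), (∀ x ∈ res, x ≤ l0) →
    ((PySem.List.enumerate st (l0 + 1)).foldl (tapMLine w) res).length =
      res.length + (st.map (fun line => tapCnt w ((PySem.Str.split? line " ").getD []))).sum := by
  induction st with
  | nil => intro res l0 _; simp [PySem.List.enumerate]
  | cons i rest ih =>
    intro res l0 hle
    have henum : PySem.List.enumerate (i :: rest) (l0 + 1) =
        (l0 + 1, i) :: PySem.List.enumerate rest (l0 + 1 + 1) := by
      simp [PySem.List.enumerate]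
    rw [henum]
    simp only [List.foldl_cons, List.map_cons, List.sum_cons]
    have hline : tapMLine w res (l0 + 1, i) =
        res ++ List.replicate (tapCnt w ((PySem.Str.split? i " ").getD [])) (l0 + 1) := by
      unfold tapMLine
      apply preX
      by_cases hres : res = []
      · exact Or.inl hres
      · refine Or.inr (fun hlast => ?_)
        have := hle _ (hlast ▸ pyGetD_neg_one_mem res hres)
        omega
    rw [hline, ih _ (l0 + 1) (by
      intro x hx
      rcases List.mem_append.mp hx with h | h
      · exact (hle x h).trans (by omega)
      · rw [List.eq_of_mem_replicate h])]
    simp only [List.length_append, List.length_replicate]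
    omega

lemma cnt_ge_ind (w : String) (toks : List String) :
    (if toks.any (fun t => PySem.Str.lower t == w) then 1 else 0) ≤ tapCnt w toks := by
  by_cases h : toks.any (fun t => PySem.Str.lower t == w) = true
  · rw [if_pos h]
    obtain ⟨t, ht, hp⟩ := List.any_eq_true.mp h
    have hfs : (toks.find? (fun t => PySem.Str.lower t == w)).isSome :=
      List.find?_isSome.mpr ⟨t, ht, hp⟩
    obtain ⟨u, hu⟩ := Option.isSome_iff_exists.mp hfs
    have hum : u ∈ toks := List.mem_of_find?_eq_some hu
    have hup : PySem.Str.lower u = w := by simpa using List.find?_some hu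
    unfold tapCnt
    by_cases huw : u = w
    · have : (toks.find? (fun t => PySem.Str.lower t == w) == some w) = true := by
        rw [hu, huw]; simp
      rw [this]; simp
    · have humix : u ∈ toks.filter (fun x => PySem.Str.lower x == w && x != w) := by
        simp [List.mem_filter, hum, hup, huw]
      have : 0 < tapMixedCnt w toks := List.length_pos_iff.mpr (List.ne_nil_of_mem humix)
      omega
  · simp only [Bool.not_eq_true] at h
    rw [h]; simp

lemma cnt_ge_two_of_bad (w : String) (toks : List String) (h : tapBadToks w toks = true) :
    2 ≤ tapCnt w toks := by
  unfold tapBadToks at h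
  simp only [Bool.or_eq_true, Bool.and_eq_true, decide_eq_true_eq] at h
  unfold tapCnt tapMixedCnt
  rcases h with h | ⟨h1, h2⟩
  · omega
  · rw [h2]; simpa using h1

lemma sum_ind_le_cnt (w : String) (st : List String) :
    (st.map (fun line => if ((PySem.Str.split? line " ").getD []).any (fun t => PySem.Str.lower t == w) then 1 else 0)).sum ≤
      (st.map (fun line => tapCnt w ((PySem.Str.split? line " ").getD []))).sum := by
  induction st with
  | nil => simp
  | cons i rest ih =>
    simp only [List.map_cons, List.sum_cons]
    have := cnt_ge_ind w ((PySem.Str.split? i " ").getD [])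
    omega

lemma sum_ind_lt_cnt (w : String) (st : List String)
    (h : ∃ line ∈ st, pvBadLine w line = true) :
    (st.map (fun line => if ((PySem.Str.split? line " ").getD []).any (fun t => PySem.Str.lower t == w) then 1 else 0)).sum <
      (st.map (fun line => tapCnt w ((PySem.Str.split? line " ").getD []))).sum := by
  induction st with
  | nil => simp at h
  | cons i rest ih =>
    simp only [List.map_cons, List.sum_cons]
    rcases h with ⟨line, hmem, hbad⟩
    rcases List.mem_cons.mp hmem with h | h
    · subst h
      have h2 : 2 ≤ tapCnt w ((PySem.Str.split? line " ").getD []) := cnt_ge_two_of_bad w _ hbad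
      have h1 : (if ((PySem.Str.split? line " ").getD []).any (fun t => PySem.Str.lower t == w) then 1 else 0) ≤ 1 := by
        split <;> omega
      have := sum_ind_le_cnt w rest
      omega
    · have := ih ⟨line, h, hbad⟩
      have := cnt_ge_ind w ((PySem.Str.split? i " ").getD [])
      omega

-- ===== VERDICT (by name: the statement is the Claim_ definition above) =====
theorem tapsearch_spec : Claim_unchanged_tapsearch := by
  intro st word _ hnD
  have hbad : ∀ line ∈ st, pvBadLine (pvLstripSpaces word) line = false := by
    unfold D_tapsearch at hnD
    simp only [List.any_eq_true, not_exists, not_and, Bool.not_eq_true] at hnD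
    intro line hl
    simpa using hnD line hl
  rw [A_eq_mimic]
  unfold tapMimic tapsearch_alt
  simpa using outer_lemma (pvLstripSpaces word) st [] 0 hbad (by simp)

theorem tapsearch_changed : Claim_changed_tapsearch := by
  unfold Claim_changed_tapsearch; decide

theorem tapsearch_tight : Claim_exact_tapsearch := by
  intro st word _ hD heq
  have hb : ∃ line ∈ st, pvBadLine (pvLstripSpaces word) line = true := by
    unfold D_tapsearch at hD
    exact List.any_eq_true.mp hD
  have hlen := congrArg List.length heq
  rw [A_eq_mimic] at hlen
  unfold tapMimic tapsearch_alt at hlen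
  have hm : ((PySem.List.enumerate st (0 + 1)).foldl (tapMLine (pvLstripSpaces word)) []).length =
      (st.map (fun line => tapCnt (pvLstripSpaces word) ((PySem.Str.split? line " ").getD []))).sum := by
    simpa using mimic_len (pvLstripSpaces word) st [] 0 (by simp)
  have ha := alt_len (pvLstripSpaces word) st 1
  rw [show (0 : Int) + 1 = 1 by norm_num] at hm
  rw [hm, ha] at hlen
  exact absurd hlen (Nat.ne_of_gt (sum_ind_lt_cnt (pvLstripSpaces word) st hb))
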